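-- pv_equiv track=rewrite | github.com/Zeosleus/2D_NIM | 2D-NIM-Game.py | getAllPossibleBlocks
-- ===== SOURCE A (Python) =====
-- def isCellDiagonal(cellIndex, N):
--     return (cellIndex - 1) % (N + 1) == 0
--
-- def getRowAndColumn(move, N):  # returns the row and col of the "move" argument
--     moveRow = 1 + (move - 1) // N
--     moveColumn = 1 + (move - 1) % N
--     return moveRow, moveColumn
--
-- def getAllPossibleBlocks(emptyCells, blockDim, N):
--     blockMoves = []
--
--     # Sort the emptyCells list, since the block detection logic depends on starting from "block-start" cells and
--     # examining the next blockDim - 1 "places" (i.e. cells whose linear index is bigger than the "block-start" cell)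
--     emptyCells.sort()
--
--     # choose "block-start" cell
--     for i in range(0, len(emptyCells) - (blockDim - 1)):
--         # skip diagonal cells, since no cell block can start from a diagonal cell
--         if not isCellDiagonal(emptyCells[i], N):
--             # gather all cells in the next blockDim - 1 "places" of the same **row** as the one the "block-start" cell
--             # belongs to. All cells must be non-diagonal, since no cell block can contain diagonal cells.
--             rowNextCells = [cell for cell in [*range(emptyCells[i], emptyCells[i] + blockDim, 1)]
--                             if not isCellDiagonal(cell, N)
--                             and getRowAndColumn(emptyCells[i], N)[0] == getRowAndColumn(cell, N)[0]]
--
--             # Since rowNextCells contains emptyCells[i], i.e. the current block-start cell, we need to check if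
--             # the number of cells in rowNextCells is equal to the number of cells in the block (i.e. blockDim), and
--             # also that each cell in rowNextCells is empty.
--             # The same applies to colNextCells below.
--             if len(rowNextCells) == blockDim and all(cell in emptyCells for cell in rowNextCells):
--                 blockMoves.append(tuple(emptyCells[i: i + blockDim]))
--
--             # gather all cells in the next blockDim - 1 "places" of the same **column** as the one the "block-start"
--             # cell belongs to. All cells must be non-diagonal, since no cell block can contain diagonal cells.
--             colNextCells = [cell for cell in [*range(emptyCells[i], emptyCells[i] + blockDim * N, N)]
--                             if not isCellDiagonal(cell, N)
--                             and getRowAndColumn(emptyCells[i], N)[1] == getRowAndColumn(cell, N)[1]]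
--
--             if len(colNextCells) == blockDim and all(cell in emptyCells for cell in colNextCells):
--                 blockMoves.append(tuple(colNextCells))
--
--     return blockMoves  # return the list that contains both all possible row and col blocks, as a list of "block" moves
-- ===== SOURCE B (Python) =====
-- # B: two separate passes (row blocks, column blocks) over the sorted cells with a set for
-- # membership, then a two-pointer merge by start cell (row before column) to restore A's order.
-- # Like A, sorts the emptyCells list in place; equivalence is about the return value.
-- def getAllPossibleBlocks(emptyCells, blockDim, N):
--     emptyCells.sort()
--     if blockDim > len(emptyCells):
--         return []  # no block of blockDim cells can fit in fewer empty cells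
--     cells = set(emptyCells)
--
--     def nondiag(x):
--         return (x - 1) % (N + 1) != 0
--
--     rowBlocks = []
--     for c in emptyCells:
--         blk = [c + k for k in range(blockDim)]
--         if all(x in cells and nondiag(x) and (x - 1) // N == (c - 1) // N for x in blk):
--             rowBlocks.append(tuple(blk))
--
--     colBlocks = []
--     for c in emptyCells:
--         blk = [c + k * N for k in range(blockDim)]
--         if all(x in cells and nondiag(x) for x in blk):
--             colBlocks.append(tuple(blk))
--
--     out = []
--     i = j = 0
--     while i < len(rowBlocks) and j < len(colBlocks):
--         if rowBlocks[i][0] <= colBlocks[j][0]: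
--             out.append(rowBlocks[i]); i += 1
--         else:
--             out.append(colBlocks[j]); j += 1
--     out.extend(rowBlocks[i:])
--     out.extend(colBlocks[j:])
--     return out
-- ===== Notes on version B (the rewrite author's own statement) =====
-- stated objective: faster
-- what changed: Replaces A's single index loop that re-derives each candidate block per start index and scans the whole list for membership of every cell by two independent passes (row blocks, then column blocks) over the sorted cells using a set for membership, followed by a two-pointer merge of the two start-sorted block lists that restores A's row-before-column interleaving; B also returns [] at once when blockDim exceeds the number of empty cells.
-- outside the precondition, e.g. on getAllPossibleBlocks([2, 2, 3], 2, 3): A returns [(2, 2), (2, 3)], B returns [(2, 3), (2, 3)]; on getAllPossibleBlocks([-1, 3], 2, -4): A returns [], B returns [(3, -1)]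
import Mathlib
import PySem

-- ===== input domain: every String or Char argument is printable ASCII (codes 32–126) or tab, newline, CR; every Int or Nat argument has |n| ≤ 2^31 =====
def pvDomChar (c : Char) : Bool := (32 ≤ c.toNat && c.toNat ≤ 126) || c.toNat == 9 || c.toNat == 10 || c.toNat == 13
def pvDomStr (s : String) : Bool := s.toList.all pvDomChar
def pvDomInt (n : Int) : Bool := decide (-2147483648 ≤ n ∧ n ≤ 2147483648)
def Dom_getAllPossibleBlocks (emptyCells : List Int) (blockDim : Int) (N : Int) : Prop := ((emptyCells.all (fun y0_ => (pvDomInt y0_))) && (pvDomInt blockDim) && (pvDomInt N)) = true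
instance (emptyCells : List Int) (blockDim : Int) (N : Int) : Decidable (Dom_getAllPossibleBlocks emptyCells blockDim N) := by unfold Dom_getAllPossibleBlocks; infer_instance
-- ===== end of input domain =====

-- B replaces A's single index loop (with its inner list-membership scans) by two separate passes
-- producing row blocks and column blocks with a set for membership, merged by start cell (row
-- before column).  Like A, the Python B sorts emptyCells in place; the claim is about the return value.

-- ===== PORT A =====
def pvIsCellDiagonal (cellIndex : Int) (N : Int) : Bool :=
  PySem.Int.mod (cellIndex - 1) (N + 1) == 0

def pvGetRowAndColumn (move : Int) (N : Int) : Int × Int :=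
  (1 + PySem.Int.floordiv (move - 1) N, 1 + PySem.Int.mod (move - 1) N)

-- the body of A's for-loop over the "block-start" index i (es is the sorted emptyCells)
def pvLoopBody (es : List Int) (blockDim : Int) (N : Int)
    (blockMoves : List (List Int)) (i : Int) : List (List Int) :=
  -- emptyCells[i]: in range on every input Pre_ admits (pyGetD is exact there)
  let c := PySem.List.pyGetD es i 0
  if !pvIsCellDiagonal c N then
    let rowNextCells := (PySem.List.pyRange c (c + blockDim) 1).filter
      (fun cell => !pvIsCellDiagonal cell N &&
        ((pvGetRowAndColumn c N).1 == (pvGetRowAndColumn cell N).1))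
    let blockMoves :=
      if ((rowNextCells.length : Int) == blockDim) && rowNextCells.all (fun cell => es.contains cell)
      then blockMoves ++ [PySem.List.slice es (some i) (some (i + blockDim))]
      else blockMoves
    let colNextCells := (PySem.List.pyRange c (c + blockDim * N) N).filter
      (fun cell => !pvIsCellDiagonal cell N &&
        ((pvGetRowAndColumn c N).2 == (pvGetRowAndColumn cell N).2))
    if ((colNextCells.length : Int) == blockDim) && colNextCells.all (fun cell => es.contains cell)
    then blockMoves ++ [colNextCells]
    else blockMoves
  else blockMoves

def getAllPossibleBlocks (emptyCells : List Int) (blockDim : Int) (N : Int) : List (List Int) :=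
  let es := PySem.List.sorted emptyCells (fun x => x) false
  (PySem.List.pyRange 0 ((es.length : Int) - (blockDim - 1)) 1).foldl (pvLoopBody es blockDim N) []

-- ===== PORT B =====
def pvNondiag (N : Int) (x : Int) : Bool :=
  PySem.Int.mod (x - 1) (N + 1) != 0

def pvBlkRow (b : Int) (c : Int) : List Int :=
  (PySem.List.pyRange 0 b 1).map (fun k => c + k)

def pvBlkCol (b : Int) (N : Int) (c : Int) : List Int :=
  (PySem.List.pyRange 0 b 1).map (fun k => c + k * N)

def pvRowOk (cells : PySem.Set Int) (b : Int) (N : Int) (c : Int) : Bool :=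
  (pvBlkRow b c).all (fun x => PySem.Set.contains cells x && pvNondiag N x &&
    (PySem.Int.floordiv (x - 1) N == PySem.Int.floordiv (c - 1) N))

def pvColOk (cells : PySem.Set Int) (b : Int) (N : Int) (c : Int) : Bool :=
  (pvBlkCol b N c).all (fun x => PySem.Set.contains cells x && pvNondiag N x)

-- two-pointer merge of the two start-sorted block lists (Source B's while loop; blocks are
-- nonempty on every admitted input, so headD 0 is exactly blk[0])
def pvMerge : List (List Int) → List (List Int) → List (List Int)
  | [], ys => ys
  | xs, [] => xs
  | x :: xs, y :: ys =>
    if x.headD 0 ≤ y.headD 0 then x :: pvMerge xs (y :: ys) else y :: pvMerge (x :: xs) ys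

def getAllPossibleBlocks_alt (emptyCells : List Int) (blockDim : Int) (N : Int) : List (List Int) :=
  let es := PySem.List.sorted emptyCells (fun x => x) false
  if blockDim > (es.length : Int) then []  -- no block of blockDim cells fits in fewer cells
  else
    let cells : PySem.Set Int := PySem.Set.ofList emptyCells
    let rowBlocks := es.foldl (fun acc c =>
      if pvRowOk cells blockDim N c then acc ++ [pvBlkRow blockDim c] else acc) []
    let colBlocks := es.foldl (fun acc c =>
      if pvColOk cells blockDim N c then acc ++ [pvBlkCol blockDim N c] else acc) []
    pvMerge rowBlocks colBlocks

-- ===== PRECONDITION & SPEC =====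
-- Pre_ excludes: blockDim ≤ 0 (A raises IndexError) and N = -1 with at least blockDim cells
-- (A raises ZeroDivisionError); and, when a block could fit (blockDim ≤ number of cells),
-- lists with duplicate cells on boards N ≥ 1 (A's slice-based row blocks accidentally repeat
-- cells there) and board sizes N ≤ -3, a nonsense domain on which A's index bound
-- accidentally drops descending column blocks.
def Pre_getAllPossibleBlocks (emptyCells : List Int) (blockDim : Int) (N : Int) : Prop :=
  1 ≤ blockDim ∧ ((emptyCells.length : Int) < blockDim ∨
    (-2 ≤ N ∧ N ≠ -1 ∧ (emptyCells.Nodup ∨ N ≤ 0)))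

instance (emptyCells : List Int) (blockDim : Int) (N : Int) : Decidable (Pre_getAllPossibleBlocks emptyCells blockDim N) := by
  unfold Pre_getAllPossibleBlocks; infer_instance

def pvWitness_getAllPossibleBlocks : List Int × Int × Int := ([2, 3, 6, 7, 10, 11], 2, 3)

def Spec_getAllPossibleBlocks (emptyCells : List Int) (blockDim : Int) (N : Int) (out : List (List Int)) : Prop := out = getAllPossibleBlocks_alt emptyCells blockDim N
instance (emptyCells : List Int) (blockDim : Int) (N : Int) (out : List (List Int)) : Decidable (Spec_getAllPossibleBlocks emptyCells blockDim N out) := by unfold Spec_getAllPossibleBlocks; infer_instance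

-- ===== CLAIM (what is proved, stated in full; the proofs are below) =====
def Claim_equal_getAllPossibleBlocks : Prop := ∀ (emptyCells : List Int) (blockDim : Int) (N : Int), Dom_getAllPossibleBlocks emptyCells blockDim N → Pre_getAllPossibleBlocks emptyCells blockDim N → Spec_getAllPossibleBlocks emptyCells blockDim N (getAllPossibleBlocks emptyCells blockDim N)

-- ===== LEMMAS AND PROOFS =====

-- per-cell contribution both programs are reduced to
def pvG (cells : PySem.Set Int) (b : Int) (N : Int) (c : Int) : List (List Int) :=
  (if pvRowOk cells b N c then [pvBlkRow b c] else []) ++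
  (if pvColOk cells b N c then [pvBlkCol b N c] else [])

lemma pvMerge_nil_right (xs : List (List Int)) : pvMerge xs [] = xs := by
  cases xs <;> simp [pvMerge]

lemma pvMerge_cons_left (x : List Int) (xs ys : List (List Int))
    (h : ∀ y ∈ ys, x.headD 0 ≤ y.headD 0) : pvMerge (x :: xs) ys = x :: pvMerge xs ys := by
  cases ys with
  | nil => rw [pvMerge_nil_right, pvMerge_nil_right]
  | cons y ys => rw [pvMerge, if_pos (h y (by simp))]

lemma pvMerge_cons_right (y : List Int) (xs ys : List (List Int))
    (h : ∀ x ∈ xs, ¬ (x.headD 0 ≤ y.headD 0)) : pvMerge xs (y :: ys) = y :: pvMerge xs ys := by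
  cases xs with
  | nil => simp [pvMerge]
  | cons x xs => rw [pvMerge, if_neg (h x (by simp))]

lemma pvBlkRow_eq_map (b c : Int) :
    pvBlkRow b c = (List.range b.toNat).map (fun k : Nat => c + (k : Int)) := by
  rw [pvBlkRow, PySem.List.pyRange_one]
  simp [List.map_map, Function.comp_def]

lemma pvBlkCol_eq_map (b N c : Int) :
    pvBlkCol b N c = (List.range b.toNat).map (fun k : Nat => c + (k : Int) * N) := by
  rw [pvBlkCol, PySem.List.pyRange_one]
  simp [List.map_map, Function.comp_def]

lemma pvBlkRow_headD (b c : Int) (hb : 1 ≤ b) : (pvBlkRow b c).headD 0 = c := by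
  rw [pvBlkRow, PySem.List.pyRange_one_cons (by omega)]
  simp

lemma pvBlkCol_headD (b N c : Int) (hb : 1 ≤ b) : (pvBlkCol b N c).headD 0 = c := by
  rw [pvBlkCol, PySem.List.pyRange_one_cons (by omega)]
  simp

lemma pvMerge_flat (p q : Int → Bool) (f g : Int → List Int)
    (hf : ∀ c, (f c).headD 0 = c) (hg : ∀ c, (g c).headD 0 = c) :
    ∀ es : List Int, es.Pairwise (· < ·) →
      pvMerge ((es.filter p).map f) ((es.filter q).map g)
        = es.flatMap (fun c => (if p c then [f c] else []) ++ (if q c then [g c] else []))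
  | [], _ => by simp [pvMerge]
  | c :: es, h => by
    have hcons := List.pairwise_cons.mp h
    have hlt : ∀ x ∈ es, c < x := hcons.1
    have htail := pvMerge_flat p q f g hf hg es hcons.2
    have hR : ∀ blk ∈ (es.filter p).map f, c < blk.headD 0 := by
      intro blk hb
      obtain ⟨x, hx, rfl⟩ := List.mem_map.mp hb
      rw [hf]; exact hlt x (List.mem_of_mem_filter hx)
    have hC : ∀ blk ∈ (es.filter q).map g, c < blk.headD 0 := by
      intro blk hb
      obtain ⟨x, hx, rfl⟩ := List.mem_map.mp hb
      rw [hg]; exact hlt x (List.mem_of_mem_filter hx)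
    simp only [List.flatMap_cons, List.filter_cons]
    cases hp : p c <;> cases hq : q c <;>
      simp only [Bool.false_eq_true, if_true, if_false, List.map_cons]
    · rw [htail]; simp
    · rw [pvMerge_cons_right _ _ _ (fun x hx => by rw [hg]; exact not_le.mpr (hR x hx)), htail]
      simp
    · rw [pvMerge_cons_left _ _ _ (fun y hy => by rw [hf]; exact le_of_lt (hC y hy)), htail]
      simp
    · rw [pvMerge_cons_left _ _ _ (by
        intro y hy
        rcases List.mem_cons.mp hy with rfl | hy'
        · rw [hf, hg]
        · rw [hf]; exact le_of_lt (hC y hy')),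
        pvMerge_cons_right _ _ _ (fun x hx => by rw [hg]; exact not_le.mpr (hR x hx)), htail]
      simp

lemma pv_es_lt (e : List Int) (hnd : e.Nodup) :
    (PySem.List.sorted e (fun x => x) false).Pairwise (· < ·) := by
  have hle := PySem.List.sorted_pairwise e (fun x => x)
  have hnd' : (PySem.List.sorted e (fun x => x) false).Nodup :=
    (List.Perm.nodup_iff (PySem.List.sorted_perm e (fun x => x) false)).mpr hnd
  exact (hle.and hnd').imp (fun h => lt_of_le_of_ne h.1 h.2)

lemma pv_getElem_lt (es : List Int) (hlt : es.Pairwise (· < ·)) {i j : Nat}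
    (hi : i < es.length) (hj : j < es.length) (hij : i < j) : es[i] < es[j] :=
  List.pairwise_iff_getElem.mp hlt i j hi hj hij

lemma pv_mem_drop (es : List Int) (hlt : es.Pairwise (· < ·)) {j : Nat} (hj : j < es.length)
    {x : Int} (hx : x ∈ es) (hgt : es[j] < x) : x ∈ es.drop (j + 1) := by
  obtain ⟨m, hm, rfl⟩ := List.mem_iff_getElem.mp hx
  have hjm : j < m := by
    by_contra hle
    rw [not_lt] at hle
    rcases Nat.eq_or_lt_of_le hle with rfl | h2
    · exact absurd hgt (lt_irrefl _)
    · exact absurd hgt (not_lt.mpr (le_of_lt (pv_getElem_lt es hlt hm hj h2)))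
  have hm' : m - (j + 1) < (es.drop (j + 1)).length := by
    simp [List.length_drop]; omega
  have heq : (es.drop (j + 1))[m - (j + 1)] = es[m] := by
    rw [List.getElem_drop]
    congr 1
    omega
  rw [← heq]
  exact List.getElem_mem _

lemma pv_count (es : List Int) (hlt : es.Pairwise (· < ·)) {j : Nat} (hj : j < es.length)
    (T : List Int) (hT : T.Nodup) (hsub : ∀ x ∈ T, x ∈ es ∧ es[j] < x) :
    j + 1 + T.length ≤ es.length := by
  have hss : T ⊆ es.drop (j + 1) := fun x hx =>
    pv_mem_drop es hlt hj (hsub x hx).1 (hsub x hx).2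
  have := (hT.subperm hss).length_le
  rw [List.length_drop] at this
  omega

lemma pv_run_getElem (es : List Int) (hlt : es.Pairwise (· < ·)) {j : Nat} (hj : j < es.length)
    {c : Int} (hc : es[j] = c) {m : Nat} (hmem : ∀ k : Nat, k < m → c + (k : Int) ∈ es) :
    ∀ k : Nat, k < m → ∃ h : j + k < es.length, es[j + k] = c + (k : Int) := by
  intro k
  induction k with
  | zero => intro _; exact ⟨by omega, by simpa using hc⟩
  | succ k ih =>
    intro hk1
    obtain ⟨hjk, hek⟩ := ih (by omega)
    obtain ⟨m', hm', he'⟩ := List.mem_iff_getElem.mp (hmem (k + 1) hk1)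
    have hmgt : j + k < m' := by
      by_contra hle
      rw [not_lt] at hle
      have hle2 : es[m'] ≤ es[j + k] := by
        rcases Nat.eq_or_lt_of_le hle with rfl | h2
        · exact le_refl _
        · exact le_of_lt (pv_getElem_lt es hlt hm' hjk h2)
      rw [he', hek] at hle2
      push_cast at hle2
      omega
    have hlen : j + (k + 1) < es.length := by omega
    refine ⟨hlen, ?_⟩
    have h1 : es[j + k] < es[j + (k + 1)] := pv_getElem_lt es hlt hjk hlen (by omega)
    have h2 : es[j + (k + 1)] ≤ es[m'] := by
      rcases Nat.eq_or_lt_of_le (by omega : j + (k + 1) ≤ m') with heq | h3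
      · simp [heq]
      · exact le_of_lt (pv_getElem_lt es hlt hlen hm' h3)
    rw [hek] at h1
    rw [he'] at h2
    push_cast at *
    omega

lemma pv_run_slice (es : List Int) (hlt : es.Pairwise (· < ·)) {j : Nat} (hj : j < es.length)
    {c : Int} (hc : es[j] = c) {m : Nat} (hm0 : 1 ≤ m)
    (hmem : ∀ k : Nat, k < m → c + (k : Int) ∈ es) :
    (es.drop j).take m = (List.range m).map (fun k : Nat => c + (k : Int)) := by
  have hlen : j + m ≤ es.length := by
    obtain ⟨h, _⟩ := pv_run_getElem es hlt hj hc hmem (m - 1) (by omega)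
    omega
  apply List.ext_getElem
  · simp [List.length_take, List.length_drop]; omega
  · intro n h1 h2
    simp only [List.getElem_take, List.getElem_drop, List.getElem_map, List.getElem_range]
    have hn : n < m := by simp [List.length_take, List.length_drop] at h1; omega
    obtain ⟨_, he⟩ := pv_run_getElem es hlt hj hc hmem n hn
    exact he

lemma pv_contains_eq (e : List Int) (x : Int) :
    (PySem.List.sorted e (fun y => y) false).contains x
      = PySem.Set.contains (PySem.Set.ofList e) x := by
  apply Bool.eq_iff_iff.mpr
  rw [List.contains_iff_mem, PySem.Set.contains_iff, PySem.List.mem_sorted, PySem.Set.mem_ofList]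

lemma pv_not_diag (N x : Int) : (!pvIsCellDiagonal x N) = pvNondiag N x := rfl

lemma pvNondiag_deg (N x : Int) (h : N = 0 ∨ N = -2) : pvNondiag N x = false := by
  have hdvd : (N + 1) ∣ (x - 1) := by
    rcases h with rfl | rfl
    · exact one_dvd _
    · exact (neg_dvd.mpr (one_dvd _) : (-1 : Int) ∣ (x - 1))
  have hz : PySem.Int.mod (x - 1) (N + 1) = 0 := (PySem.Int.mod_eq_zero_iff_dvd _ _).mpr hdvd
  simp [pvNondiag, hz]

lemma pv_mem_blkRow_self (b c : Int) (hb : 1 ≤ b) : c ∈ pvBlkRow b c := by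
  rw [pvBlkRow_eq_map]
  exact List.mem_map.mpr ⟨0, List.mem_range.mpr (by omega), by simp⟩

lemma pv_mem_blkCol_self (b N c : Int) (hb : 1 ≤ b) : c ∈ pvBlkCol b N c := by
  rw [pvBlkCol_eq_map]
  exact List.mem_map.mpr ⟨0, List.mem_range.mpr (by omega), by simp⟩

lemma pvRowOk_false_of_nondiag_false (cells : PySem.Set Int) (b N c : Int) (hb : 1 ≤ b)
    (h : pvNondiag N c = false) : pvRowOk cells b N c = false := by
  apply Bool.eq_false_iff.mpr
  intro hall
  have := List.all_eq_true.mp (by rw [← pvRowOk]; exact hall) c (pv_mem_blkRow_self b c hb)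
  simp [h] at this

lemma pvColOk_false_of_nondiag_false (cells : PySem.Set Int) (b N c : Int) (hb : 1 ≤ b)
    (h : pvNondiag N c = false) : pvColOk cells b N c = false := by
  apply Bool.eq_false_iff.mpr
  intro hall
  have := List.all_eq_true.mp (by rw [← pvColOk]; exact hall) c (pv_mem_blkCol_self b N c hb)
  simp [h] at this

lemma pvRange_row_eq (c b : Int) : PySem.List.pyRange c (c + b) 1 = pvBlkRow b c := by
  rw [PySem.List.pyRange_one, pvBlkRow_eq_map]
  have h : c + b - c = b := by ring
  rw [h]

lemma pvRange_col_eq (c b N : Int) (hN : 0 < N) :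
    PySem.List.pyRange c (c + b * N) N = pvBlkCol b N c := by
  rw [PySem.List.pyRange_of_pos c (c + b * N) hN, pvBlkCol_eq_map]
  have hcnt : (if c < c + b * N then ((c + b * N - c + N - 1) / N).toNat else 0) = b.toNat := by
    by_cases hlt : c < c + b * N
    · rw [if_pos hlt]
      have h1 : c + b * N - c + N - 1 = (N - 1) + b * N := by ring
      rw [h1, Int.add_mul_ediv_right _ _ (by omega : N ≠ 0),
        Int.ediv_eq_zero_of_lt (by omega) (by omega)]
      simp
    · rw [if_neg hlt]
      have hb0 : b ≤ 0 := by
        by_contra hbp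
        rw [not_le] at hbp
        exact hlt (by nlinarith)
      omega
  rw [hcnt]
  exact List.map_congr_left (fun k _ => by ring)

lemma pv_filter_row (c b N : Int) :
    (pvBlkRow b c).filter (fun cell => !pvIsCellDiagonal cell N &&
      ((pvGetRowAndColumn c N).1 == (pvGetRowAndColumn cell N).1))
    = (pvBlkRow b c).filter (fun x => pvNondiag N x &&
      (PySem.Int.floordiv (x - 1) N == PySem.Int.floordiv (c - 1) N)) := by
  apply List.filter_congr
  intro x _
  rw [pv_not_diag]
  congr 1
  apply Bool.eq_iff_iff.mpr
  simp only [pvGetRowAndColumn, beq_iff_eq]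
  omega

lemma pv_filter_col (c b N : Int) (hN : 0 < N) :
    (pvBlkCol b N c).filter (fun cell => !pvIsCellDiagonal cell N &&
      ((pvGetRowAndColumn c N).2 == (pvGetRowAndColumn cell N).2))
    = (pvBlkCol b N c).filter (fun x => pvNondiag N x) := by
  apply List.filter_congr
  intro x hx
  rw [pv_not_diag]
  rw [pvBlkCol_eq_map] at hx
  obtain ⟨k, _, rfl⟩ := List.mem_map.mp hx
  have hmod : PySem.Int.mod (c + (k : Int) * N - 1) N = PySem.Int.mod (c - 1) N := by
    rw [PySem.Int.mod_eq_emod_of_pos hN, PySem.Int.mod_eq_emod_of_pos hN]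
    have h : c + (k : Int) * N - 1 = (c - 1) + (k : Int) * N := by ring
    rw [h, Int.add_mul_emod_self_right]
  simp [pvGetRowAndColumn, hmod]

lemma pvCond_eq (es' : List Int) (b : Int) (hb : 1 ≤ b) (blk : List Int)
    (hblk : blk.length = b.toNat) (q r : Int → Bool)
    (hqr : ∀ x ∈ blk, (q x && es'.contains x) = r x) :
    (((blk.filter q).length : Int) == b && (blk.filter q).all (fun x => es'.contains x))
      = blk.all r := by
  apply Bool.eq_iff_iff.mpr
  simp only [Bool.and_eq_true, List.all_eq_true, beq_iff_eq]
  constructor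
  · rintro ⟨hlen, hall⟩ x hx
    have hq : blk.filter q = blk := by
      apply List.filter_eq_self.mpr
      have hlen' : (blk.filter q).length = blk.length := by omega
      rw [← List.countP_eq_length_filter] at hlen'
      exact List.countP_eq_length.mp hlen'
    rw [← hqr x hx, Bool.and_eq_true]
    exact ⟨(List.filter_eq_self.mp hq) x hx, hall x (by rw [hq]; exact hx)⟩
  · intro hall
    have hqall : ∀ y ∈ blk, q y = true := fun y hy => by
      have h := hall y hy
      rw [← hqr y hy, Bool.and_eq_true] at h
      exact h.1
    have hfe : blk.filter q = blk := List.filter_eq_self.mpr hqall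
    refine ⟨by rw [hfe, hblk]; omega, ?_⟩
    intro x hx
    rw [hfe] at hx
    have h := hall x hx
    rw [← hqr x hx, Bool.and_eq_true] at h
    exact h.2

lemma pv_blkRow_length (b c : Int) : (pvBlkRow b c).length = b.toNat := by
  rw [pvBlkRow_eq_map]; simp

lemma pv_blkCol_length (b N c : Int) : (pvBlkCol b N c).length = b.toNat := by
  rw [pvBlkCol_eq_map]; simp

-- members of a row/col block are cells of the board list when the check passes
lemma pvRowOk_mem (e : List Int) (b N c : Int) (hOk : pvRowOk (PySem.Set.ofList e) b N c = true) :
    ∀ k : Nat, k < b.toNat → c + (k : Int) ∈ PySem.List.sorted e (fun x => x) false := by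
  intro k hk
  have hx : c + (k : Int) ∈ pvBlkRow b c := by
    rw [pvBlkRow_eq_map]
    exact List.mem_map.mpr ⟨k, List.mem_range.mpr hk, rfl⟩
  have h := List.all_eq_true.mp hOk _ hx
  rw [Bool.and_eq_true, Bool.and_eq_true] at h
  have hc2 := h.1.1
  rw [PySem.Set.contains_iff, PySem.Set.mem_ofList] at hc2
  exact (PySem.List.mem_sorted _ _ _ _).mpr hc2

lemma pvColOk_mem (e : List Int) (b N c : Int) (hOk : pvColOk (PySem.Set.ofList e) b N c = true) :
    ∀ k : Nat, k < b.toNat → c + (k : Int) * N ∈ PySem.List.sorted e (fun x => x) false := by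
  intro k hk
  have hx : c + (k : Int) * N ∈ pvBlkCol b N c := by
    rw [pvBlkCol_eq_map]
    exact List.mem_map.mpr ⟨k, List.mem_range.mpr hk, rfl⟩
  have h := List.all_eq_true.mp hOk _ hx
  rw [Bool.and_eq_true] at h
  have hc2 := h.1
  rw [PySem.Set.contains_iff, PySem.Set.mem_ofList] at hc2
  exact (PySem.List.mem_sorted _ _ _ _).mpr hc2

lemma pvBody_eq (e : List Int) (b N : Int) (hnd : e.Nodup) (hb : 1 ≤ b)
    (hN : 0 < N ∨ N = 0 ∨ N = -2) (acc : List (List Int)) (i : Int) (h0 : 0 ≤ i)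
    (hi : i < ((PySem.List.sorted e (fun x => x) false).length : Int) - (b - 1)) :
    pvLoopBody (PySem.List.sorted e (fun x => x) false) b N acc i
      = acc ++ pvG (PySem.Set.ofList e) b N
          (PySem.List.pyGetD (PySem.List.sorted e (fun x => x) false) i 0) := by
  set es := PySem.List.sorted e (fun x => x) false with hes
  set cells := PySem.Set.ofList e with hcells
  have hlt : es.Pairwise (· < ·) := pv_es_lt e hnd
  have hilen : i.toNat < es.length := by omega
  set cv := PySem.List.pyGetD es i 0 with hcv
  have hcel : cv = es[i.toNat] := PySem.List.pyGetD_eq_getElem es 0 h0 (by omega)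
  simp only [pvLoopBody]
  rw [pv_not_diag]
  cases hnd2 : pvNondiag N cv with
  | false =>
    rw [pvG, pvRowOk_false_of_nondiag_false cells b N cv hb hnd2,
      pvColOk_false_of_nondiag_false cells b N cv hb hnd2]
    simp
  | true =>
    have hNpos : 0 < N := by
      rcases hN with h | h
      · exact h
      · rw [pvNondiag_deg N cv h] at hnd2; cases hnd2
    simp only [if_true]
    rw [pvRange_row_eq cv b, pvRange_col_eq cv b N hNpos, pv_filter_row cv b N,
      pv_filter_col cv b N hNpos]
    have hR : (((((pvBlkRow b cv).filter (fun x => pvNondiag N x &&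
          (PySem.Int.floordiv (x - 1) N == PySem.Int.floordiv (cv - 1) N))).length : Int) == b)
        && ((pvBlkRow b cv).filter (fun x => pvNondiag N x &&
          (PySem.Int.floordiv (x - 1) N == PySem.Int.floordiv (cv - 1) N))).all
            (fun cell => es.contains cell))
        = pvRowOk cells b N cv := by
      rw [pvRowOk]
      apply pvCond_eq es b hb _ (pv_blkRow_length b cv)
      intro x _
      rw [hes, pv_contains_eq e x, ← hcells]
      apply Bool.eq_iff_iff.mpr
      simp only [Bool.and_eq_true]
      tauto
    have hC : (((((pvBlkCol b N cv).filter (fun x => pvNondiag N x)).length : Int) == b)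
        && ((pvBlkCol b N cv).filter (fun x => pvNondiag N x)).all
            (fun cell => es.contains cell))
        = pvColOk cells b N cv := by
      rw [pvColOk]
      apply pvCond_eq es b hb _ (pv_blkCol_length b N cv)
      intro x _
      rw [hes, pv_contains_eq e x, ← hcells]
      apply Bool.eq_iff_iff.mpr
      simp only [Bool.and_eq_true]
      tauto
    rw [hR, hC, pvG]
    have hslice : pvRowOk cells b N cv = true →
        PySem.List.slice es (some i) (some (i + b)) = pvBlkRow b cv := by
      intro hOk
      rw [PySem.List.slice_toNat es h0 (by omega)]
      have h1 : (i + b).toNat - i.toNat = b.toNat := by omega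
      rw [h1, pv_run_slice es hlt hilen hcel.symm (by omega) (pvRowOk_mem e b N cv hOk),
        ← pvBlkRow_eq_map]
    have hcval : pvColOk cells b N cv = true →
        (pvBlkCol b N cv).filter (fun x => pvNondiag N x) = pvBlkCol b N cv := by
      intro hOk
      apply List.filter_eq_self.mpr
      intro x hx
      have h := List.all_eq_true.mp hOk _ hx
      rw [Bool.and_eq_true] at h
      exact h.2
    cases hrow : pvRowOk cells b N cv <;> cases hcol : pvColOk cells b N cv <;>
      simp [hslice, hcval, hrow, hcol, List.append_assoc]

lemma pv_map_getD_take (es : List Int) (K : Int) (hK : K.toNat ≤ es.length) :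
    (PySem.List.pyRange 0 K 1).map (fun i => PySem.List.pyGetD es i 0) = es.take K.toNat := by
  rw [PySem.List.pyRange_one, List.map_map]
  apply List.ext_getElem
  · simp only [List.length_map, List.length_range, List.length_take]
    omega
  · intro n h1 h2
    simp only [List.getElem_map, List.getElem_range, Function.comp_apply, List.getElem_take]
    have hn : n < es.length := by
      simp only [List.length_take] at h2; omega
    rw [PySem.List.pyGetD_eq_getElem es 0 (by omega) (by omega)]
    congr 1
    omega

lemma pvTail (e : List Int) (b N : Int) (hnd : e.Nodup) (hb : 1 ≤ b)
    (hN : 0 < N ∨ N = 0 ∨ N = -2) (c : Int)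
    (hc : c ∈ (PySem.List.sorted e (fun x => x) false).drop
      ((((PySem.List.sorted e (fun x => x) false).length : Int) - (b - 1)).toNat)) :
    pvG (PySem.Set.ofList e) b N c = [] := by
  set es := PySem.List.sorted e (fun x => x) false with hes
  set cells := PySem.Set.ofList e with hcells
  have hlt : es.Pairwise (· < ·) := pv_es_lt e hnd
  rcases hN with hNpos | hdeg
  · set Kt : Nat := (((es.length : Int)) - (b - 1)).toNat with hKt
    obtain ⟨k, hk, hek⟩ := List.mem_iff_getElem.mp hc
    have hklen : Kt + k < es.length := by
      rw [List.length_drop] at hk; omega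
    have hjc : es[Kt + k] = c := by
      rw [← hek, List.getElem_drop]
    have hrow : pvRowOk cells b N c = false := by
      apply Bool.eq_false_iff.mpr
      intro hOk
      have hmem := pvRowOk_mem e b N c hOk
      set T : List Int := (List.range (b.toNat - 1)).map (fun k : Nat => c + 1 + (k : Int)) with hT
      have hTnd : T.Nodup := List.Nodup.map (fun a a' ha => by omega) (List.nodup_range)
      have hsub : ∀ x ∈ T, x ∈ es ∧ es[Kt + k] < x := by
        intro x hx
        obtain ⟨k0, hk0, rfl⟩ := List.mem_map.mp hx
        rw [List.mem_range] at hk0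
        have hx1 : c + 1 + (k0 : Int) = c + ((k0 + 1 : Nat) : Int) := by push_cast; ring
        refine ⟨by rw [hx1]; exact hmem (k0 + 1) (by omega), ?_⟩
        rw [hjc]; omega
      have hcount := pv_count es hlt hklen T hTnd hsub
      have hTlen : T.length = b.toNat - 1 := by simp [hT]
      omega
    have hcol : pvColOk cells b N c = false := by
      apply Bool.eq_false_iff.mpr
      intro hOk
      have hmem := pvColOk_mem e b N c hOk
      set T : List Int := (List.range (b.toNat - 1)).map
        (fun k : Nat => c + (1 + (k : Int)) * N) with hT
      have hTnd : T.Nodup := List.Nodup.map (fun a a' ha => by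
        have h2 : (1 + (a : Int)) * N = (1 + (a' : Int)) * N := by omega
        have h3 : (1 + (a : Int)) = (1 + (a' : Int)) :=
          mul_right_cancel₀ (by omega) h2
        omega) (List.nodup_range)
      have hsub : ∀ x ∈ T, x ∈ es ∧ es[Kt + k] < x := by
        intro x hx
        obtain ⟨k0, hk0, rfl⟩ := List.mem_map.mp hx
        rw [List.mem_range] at hk0
        have hx1 : c + (1 + (k0 : Int)) * N = c + ((k0 + 1 : Nat) : Int) * N := by
          push_cast; ring
        have hpos : 0 < (1 + (k0 : Int)) * N := by positivity
        refine ⟨by rw [hx1]; exact hmem (k0 + 1) (by omega), ?_⟩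
        rw [hjc]; omega
      have hcount := pv_count es hlt hklen T hTnd hsub
      have hTlen : T.length = b.toNat - 1 := by simp [hT]
      omega
    rw [pvG, hrow, hcol]
    rfl
  · rw [pvG, pvRowOk_false_of_nondiag_false cells b N c hb (pvNondiag_deg N c hdeg),
      pvColOk_false_of_nondiag_false cells b N c hb (pvNondiag_deg N c hdeg)]
    rfl

theorem pv_main (e : List Int) (b N : Int) (hnd : e.Nodup) (hb : 1 ≤ b)
    (hN2 : -2 ≤ N) (hN1 : N ≠ -1) (hle : b ≤ (e.length : Int)) :
    getAllPossibleBlocks e b N = getAllPossibleBlocks_alt e b N := by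
  have hlen : (PySem.List.sorted e (fun x => x) false).length = e.length :=
    (PySem.List.sorted_perm e (fun x => x) false).length_eq
  have hN : 0 < N ∨ N = 0 ∨ N = -2 := by omega
  have hlt : (PySem.List.sorted e (fun x => x) false).Pairwise (· < ·) := pv_es_lt e hnd
  set es := PySem.List.sorted e (fun x => x) false with hes
  set cells := PySem.Set.ofList e with hcells
  set Kt : Nat := (((es.length : Int)) - (b - 1)).toNat with hKt
  have hKlen : Kt ≤ es.length := by omega
  have hA : getAllPossibleBlocks e b N = (es.take Kt).flatMap (pvG cells b N) := by
    show (PySem.List.pyRange 0 ((es.length : Int) - (b - 1)) 1).foldl (pvLoopBody es b N) []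
      = (es.take Kt).flatMap (pvG cells b N)
    rw [PySem.List.foldl_congr_mem _ _
      (fun acc i => acc ++ pvG cells b N (PySem.List.pyGetD es i 0)) []
      (by
        intro acc x hx
        obtain ⟨hx0, hx1⟩ := PySem.List.mem_pyRange_one.mp hx
        exact pvBody_eq e b N hnd hb hN acc x hx0 hx1)]
    rw [PySem.List.foldl_append_eq_flatMap, List.nil_append]
    rw [← pv_map_getD_take es ((es.length : Int) - (b - 1)) (by omega), List.flatMap_map]
  have hB : getAllPossibleBlocks_alt e b N = es.flatMap (pvG cells b N) := by
    show (if b > ((es.length : Int)) then [] else pvMerge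
        (es.foldl (fun acc c => if pvRowOk cells b N c then acc ++ [pvBlkRow b c] else acc) [])
        (es.foldl (fun acc c => if pvColOk cells b N c then acc ++ [pvBlkCol b N c] else acc) []))
      = es.flatMap (pvG cells b N)
    rw [if_neg (by rw [hes, hlen]; omega)]
    show pvMerge
        (es.foldl (fun acc c => if pvRowOk cells b N c then acc ++ [pvBlkRow b c] else acc) [])
        (es.foldl (fun acc c => if pvColOk cells b N c then acc ++ [pvBlkCol b N c] else acc) [])
      = es.flatMap (pvG cells b N)
    rw [PySem.List.foldl_append_if (fun c => pvRowOk cells b N c) (fun c => pvBlkRow b c) es [],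
      PySem.List.foldl_append_if (fun c => pvColOk cells b N c) (fun c => pvBlkCol b N c) es []]
    simp only [List.nil_append]
    rw [pvMerge_flat _ _ _ _ (fun c => pvBlkRow_headD b c hb) (fun c => pvBlkCol_headD b N c hb)
      es hlt]
    rfl
  have hdrop : (es.drop Kt).flatMap (pvG cells b N) = [] :=
    List.flatMap_eq_nil_iff.mpr (fun c hc => pvTail e b N hnd hb hN c hc)
  rw [hA, hB]
  conv_rhs => rw [← List.take_append_drop Kt es]
  rw [List.flatMap_append, hdrop, List.append_nil]

-- when fewer than blockDim cells are empty, both programs return [] at once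
lemma pv_small (e : List Int) (b N : Int) (hsm : (e.length : Int) < b) :
    getAllPossibleBlocks e b N = getAllPossibleBlocks_alt e b N := by
  have hlen : (PySem.List.sorted e (fun x => x) false).length = e.length :=
    (PySem.List.sorted_perm e (fun x => x) false).length_eq
  show (PySem.List.pyRange 0
      (((PySem.List.sorted e (fun x => x) false).length : Int) - (b - 1)) 1).foldl
      (pvLoopBody (PySem.List.sorted e (fun x => x) false) b N) []
    = (if b > (((PySem.List.sorted e (fun x => x) false).length : Int)) then [] else _)
  rw [PySem.List.pyRange_one_eq_nil (by rw [hlen]; omega), if_pos (by rw [hlen]; omega)]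
  rfl

-- degenerate boards N = 0 / N = -2: every cell is "diagonal", both return []
lemma pv_deg (e : List Int) (b N : Int) (hb : 1 ≤ b) (hle : b ≤ (e.length : Int))
    (hdeg : N = 0 ∨ N = -2) :
    getAllPossibleBlocks e b N = getAllPossibleBlocks_alt e b N := by
  have hlen : (PySem.List.sorted e (fun x => x) false).length = e.length :=
    (PySem.List.sorted_perm e (fun x => x) false).length_eq
  set es := PySem.List.sorted e (fun x => x) false with hes
  set cells := PySem.Set.ofList e with hcells
  have hA : getAllPossibleBlocks e b N = [] := by
    show (PySem.List.pyRange 0 ((es.length : Int) - (b - 1)) 1).foldl (pvLoopBody es b N) [] = []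
    rw [PySem.List.foldl_congr_mem _ _ (fun acc _ => acc) []
      (by
        intro acc i _
        simp only [pvLoopBody]
        rw [pv_not_diag, pvNondiag_deg N _ hdeg]
        simp)]
    exact PySem.List.foldl_ignore _ _
  have hB : getAllPossibleBlocks_alt e b N = [] := by
    show (if b > ((es.length : Int)) then [] else pvMerge
        (es.foldl (fun acc c => if pvRowOk cells b N c then acc ++ [pvBlkRow b c] else acc) [])
        (es.foldl (fun acc c => if pvColOk cells b N c then acc ++ [pvBlkCol b N c] else acc) []))
      = []
    rw [if_neg (by rw [hes, hlen]; omega)]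
    rw [PySem.List.foldl_append_if (fun c => pvRowOk cells b N c) (fun c => pvBlkRow b c) es [],
      PySem.List.foldl_append_if (fun c => pvColOk cells b N c) (fun c => pvBlkCol b N c) es []]
    rw [List.filter_eq_nil_iff.mpr (fun c _ => by
        rw [pvRowOk_false_of_nondiag_false cells b N c hb (pvNondiag_deg N c hdeg)]
        simp),
      List.filter_eq_nil_iff.mpr (fun c _ => by
        rw [pvColOk_false_of_nondiag_false cells b N c hb (pvNondiag_deg N c hdeg)]
        simp)]
    simp [pvMerge]
  rw [hA, hB]

-- ===== VERDICT (by name: the statement is the Claim_ definition above) =====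
theorem getAllPossibleBlocks_spec : Claim_equal_getAllPossibleBlocks := by
  intro e b N _ hpre
  obtain ⟨hb, hrest⟩ := hpre
  by_cases hsm : (e.length : Int) < b
  · exact pv_small e b N hsm
  · rcases hrest with hsm' | ⟨hN2, hN1, hnd_or⟩
    · exact absurd hsm' hsm
    · rcases hnd_or with hnd | hN0
      · exact pv_main e b N hnd hb hN2 hN1 (by omega)
      · exact pv_deg e b N hb (by omega) (by omega)
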